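-- pv_equiv track=rewrite | github.com/guilherme-kenzo/diario-constituinte | prepare_data_for_annotation.py | join_until_final_period
-- ===== SOURCE A (Python) =====
-- def join_until_final_period(text):
--     """Joins all lines until a final period is found.
--     """
--     lines = text.split('\n')
--     acc = []
--     current_line = ""
--     for n, line in enumerate(lines):
--         line = line.strip()
--         if not line.endswith('.'):
--             current_line += " " + line
--         else:
--             current_line += line
--             acc.append(current_line)
--             current_line = ""
--     return '\n'.join(acc)
-- ===== SOURCE B (Python) =====
-- def join_until_final_period(text):
--     """Joins all lines until a final period is found.
--
--     Two passes: first partition the stripped lines into completed groups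
--     (a group is closed by a line ending with '.'; a trailing unfinished
--     group is dropped), then render each group and join the groups.
--     """
--     groups = []
--     current = []
--     for line in text.split('\n'):
--         line = line.strip()
--         current.append(line)
--         if line.endswith('.'):
--             groups.append(current)
--             current = []
--     return '\n'.join(
--         ''.join(l if l.endswith('.') else ' ' + l for l in g)
--         for g in groups
--     )
-- ===== Notes on version B (the rewrite author's own statement) =====
-- stated objective: alternative
-- what changed: Replaces the single-pass running-string accumulator with two passes: first partition the stripped lines into an explicit list of period-closed groups, then render each group and join them.
import Mathlib
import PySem

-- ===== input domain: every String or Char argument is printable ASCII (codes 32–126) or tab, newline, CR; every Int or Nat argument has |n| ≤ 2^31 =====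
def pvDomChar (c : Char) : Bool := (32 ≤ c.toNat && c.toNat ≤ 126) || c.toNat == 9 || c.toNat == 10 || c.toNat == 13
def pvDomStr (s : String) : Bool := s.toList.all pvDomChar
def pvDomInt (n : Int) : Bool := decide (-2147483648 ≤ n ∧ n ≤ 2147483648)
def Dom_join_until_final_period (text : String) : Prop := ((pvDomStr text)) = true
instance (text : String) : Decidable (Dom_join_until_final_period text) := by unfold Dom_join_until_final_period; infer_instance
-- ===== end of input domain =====

-- B replaces A's single-pass running-string accumulator with two passes (partition the stripped
-- lines into period-closed groups, then render each group); same return value, similar cost.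

-- ===== PORT A =====
-- the body of 'for n, line in enumerate(lines)': mutates the state (acc, current_line)
def pvStepA (st : List String × String) (line : String) : List String × String :=
  let line := PySem.Str.strip line
  if !(PySem.Str.endswith line ".") then (st.1, st.2 ++ " " ++ line)
  else (st.1 ++ [st.2 ++ line], "")

def join_until_final_period (text : String) : String :=
  let lines := (PySem.Str.split? text "\n").getD []   -- sep "\n" ≠ "", so split? is always some
  let st := lines.foldl pvStepA ([], "")
  PySem.Str.join "\n" st.1

-- ===== PORT B =====
-- first pass: partition the stripped lines into period-closed groups (trailing open group dropped)
def pvGroups : List String → List String → List (List String)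
  | _cur, [] => []
  | cur, l :: rest =>
    let l := PySem.Str.strip l
    if PySem.Str.endswith l "." then (cur ++ [l]) :: pvGroups [] rest
    else pvGroups (cur ++ [l]) rest

-- second pass: ''.join(l if l.endswith('.') else ' ' + l for l in g)
def pvRend (l : String) : String := if PySem.Str.endswith l "." then l else " " ++ l
def pvRender (g : List String) : String := PySem.Str.join "" (g.map pvRend)

def join_until_final_period_alt (text : String) : String :=
  PySem.Str.join "\n" ((pvGroups [] ((PySem.Str.split? text "\n").getD [])).map pvRender)

-- ===== PRECONDITION & SPEC =====
def Spec_join_until_final_period (text : String) (out : String) : Prop := out = join_until_final_period_alt text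
instance (text : String) (out : String) : Decidable (Spec_join_until_final_period text out) := by unfold Spec_join_until_final_period; infer_instance

-- ===== CLAIM (what is proved, stated in full; the proofs are below) =====
def Claim_equal_join_until_final_period : Prop := ∀ (text : String), Dom_join_until_final_period text → Spec_join_until_final_period text (join_until_final_period text)

-- ===== LEMMAS AND PROOFS =====

theorem pv_flatten_intersperse_nil {α : Type} : ∀ (xs : List (List α)),
    (List.intersperse ([] : List α) xs).flatten = xs.flatten
  | [] => rfl
  | [x] => rfl
  | x :: y :: rest => by
    have hstep : List.intersperse ([] : List α) (x :: y :: rest)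
        = x :: [] :: List.intersperse [] (y :: rest) := rfl
    rw [hstep, List.flatten_cons, List.flatten_cons,
      pv_flatten_intersperse_nil (y :: rest), List.flatten_cons]
    simp

theorem pvRender_append_singleton (g : List String) (l : String) :
    pvRender (g ++ [l]) = pvRender g ++ pvRend l := by
  apply String.toList_inj.mp
  simp only [pvRender, PySem.Str.join, PySem.Chars.join, List.intercalate,
    String.toList_append, String.toList_ofList,
    show ("" : String).toList = ([] : List Char) from rfl]
  rw [pv_flatten_intersperse_nil, pv_flatten_intersperse_nil]
  simp

theorem pvRender_nil : pvRender [] = "" := by decide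

theorem pv_loop_eq (ls : List String) : ∀ (acc cur : List String),
    (∀ l ∈ cur, PySem.Str.endswith l "." = false) →
    (ls.foldl pvStepA (acc, pvRender cur)).1
    = acc ++ (pvGroups cur ls).map pvRender := by
  induction ls with
  | nil => intro acc cur _; simp [pvGroups]
  | cons l rest ih =>
    intro acc cur h
    rw [List.foldl_cons]
    by_cases hl : PySem.Str.endswith (PySem.Str.strip l) "." = true
    · have h1 : pvStepA (acc, pvRender cur) l
          = (acc ++ [pvRender (cur ++ [PySem.Str.strip l])], pvRender []) := by
        simp only [pvStepA, hl, Bool.not_true, Bool.false_eq_true, if_false,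
          pvRender_append_singleton, pvRend, pvRender_nil]
        simp
      rw [h1, ih _ [] (by simp)]
      simp only [pvGroups, hl, if_true, List.map_cons, List.append_assoc,
        List.singleton_append]
    · have hl' : PySem.Str.endswith (PySem.Str.strip l) "." = false :=
        Bool.not_eq_true _ ▸ eq_false_of_ne_true hl
      have h1 : pvStepA (acc, pvRender cur) l
          = (acc, pvRender (cur ++ [PySem.Str.strip l])) := by
        simp only [pvStepA, Bool.not_false, if_true,
          pvRender_append_singleton, pvRend, hl', Bool.false_eq_true, if_false,
          String.append_assoc]
      have h2 : ∀ x ∈ cur ++ [PySem.Str.strip l], PySem.Str.endswith x "." = false := by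
        intro x hx
        rcases List.mem_append.mp hx with hx | hx
        · exact h x hx
        · simp at hx; subst hx; exact hl'
      rw [h1, ih _ _ h2]
      simp only [pvGroups, hl', Bool.false_eq_true, if_false]

-- ===== VERDICT (by name: the statement is the Claim_ definition above) =====
theorem join_until_final_period_spec : Claim_equal_join_until_final_period := by
  intro text _
  show join_until_final_period text = join_until_final_period_alt text
  have h := pv_loop_eq ((PySem.Str.split? text "\n").getD []) [] [] (by simp)
  rw [pvRender_nil] at h
  simp only [join_until_final_period, join_until_final_period_alt]
  rw [h, List.nil_append]
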